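-- pv_equiv track=rewrite | github.com/tariquesani/aruuz-nigar | aruuz/rhyme/radeef.py | _assign_relevant_positions
-- ===== SOURCE A (Python) =====
-- from typing import Any, Dict, List, Optional, Sequence, Tuple
--
-- def _assign_relevant_positions(total_lines: int) -> List[int]:
--     """
--     Relevant positions in the filtered non-empty line list (0-based):
--     - first and second line
--     - then every even-numbered line (2,4,6...) in 1-based human indexing.
--     """
--     if total_lines <= 0:
--         return []
--
--     relevant: List[int] = []
--     for pos in range(total_lines):
--         line_number = pos + 1
--         if line_number in (1, 2) or (line_number >= 3 and line_number % 2 == 0):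
--             relevant.append(pos)
--     return relevant
-- ===== SOURCE B (Python) =====
-- from typing import List
--
--
-- def _assign_relevant_positions(total_lines: int) -> List[int]:
--     # Same result as A, built arithmetically: the first-two positions via a
--     # slice, then positions 3,5,7,... (1-based even lines) via a step-2 range.
--     if total_lines <= 0:
--         return []
--     return [0, 1][:total_lines] + list(range(3, total_lines, 2))
-- ===== Notes on version B (the rewrite author's own statement) =====
-- stated objective: simpler
-- what changed: Replaces the per-position loop with a parity test by direct construction: a slice [0,1][:total_lines] for the first two positions concatenated with range(3, total_lines, 2) for the odd positions (even 1-based lines); no filtering loop or branch remains.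
import Mathlib
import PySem

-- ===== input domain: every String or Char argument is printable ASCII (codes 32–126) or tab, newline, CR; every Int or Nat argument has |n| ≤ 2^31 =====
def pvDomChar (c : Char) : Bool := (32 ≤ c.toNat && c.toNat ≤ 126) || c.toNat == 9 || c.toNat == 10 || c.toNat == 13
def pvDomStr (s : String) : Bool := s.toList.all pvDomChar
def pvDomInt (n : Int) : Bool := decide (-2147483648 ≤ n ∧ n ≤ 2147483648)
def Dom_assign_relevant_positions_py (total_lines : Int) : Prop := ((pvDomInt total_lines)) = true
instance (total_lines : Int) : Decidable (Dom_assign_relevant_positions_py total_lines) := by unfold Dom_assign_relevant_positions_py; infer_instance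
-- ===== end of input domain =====

-- B builds the result directly (slice of [0,1] plus a step-2 range) instead of
-- filtering every position with a parity branch; objective: simpler.


-- ===== PORT A =====
def assign_relevant_positions_py (total_lines : Int) : List Int :=
  if total_lines ≤ 0 then []
  else
    (PySem.List.pyRange 0 total_lines 1).foldl
      (fun relevant pos =>
        let line_number := pos + 1
        if (line_number == 1 || line_number == 2)
            || (decide (3 ≤ line_number) && PySem.Int.mod line_number 2 == 0)
        then relevant ++ [pos] else relevant) []

-- ===== PORT B =====
def assign_relevant_positions_py_alt (total_lines : Int) : List Int :=
  if total_lines ≤ 0 then []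
  else PySem.List.slice [0, 1] none (some total_lines) ++ PySem.List.pyRange 3 total_lines 2

-- ===== PRECONDITION & SPEC =====
def Spec_assign_relevant_positions_py (total_lines : Int) (out : List Int) : Prop := out = assign_relevant_positions_py_alt total_lines
instance (total_lines : Int) (out : List Int) : Decidable (Spec_assign_relevant_positions_py total_lines out) := by unfold Spec_assign_relevant_positions_py; infer_instance

-- ===== CLAIM (what is proved, stated in full; the proofs are below) =====
def Claim_equal_assign_relevant_positions_py : Prop := ∀ (total_lines : Int), Dom_assign_relevant_positions_py total_lines → Spec_assign_relevant_positions_py total_lines (assign_relevant_positions_py total_lines)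

-- ===== LEMMAS AND PROOFS =====

-- The filter predicate of A, as a Bool function.
def pvRelP (pos : Int) : Bool :=
  (pos + 1 == 1 || pos + 1 == 2)
    || (decide (3 ≤ pos + 1) && PySem.Int.mod (pos + 1) 2 == 0)

lemma pvRelP_iff (x : Int) : pvRelP x = true ↔ x = 0 ∨ x = 1 ∨ (3 ≤ x ∧ x % 2 = 1) := by
  simp [pvRelP, PySem.Int.mod, Int.fmod_eq_emod]
  omega

lemma mem_pyRange32 (b x : Int) :
    x ∈ PySem.List.pyRange 3 b 2 ↔ 3 ≤ x ∧ x < b ∧ x % 2 = 1 := by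
  rw [PySem.List.mem_pyRange_iff_of_pos (by norm_num)]
  constructor
  · rintro ⟨h1, h2, k, hk⟩; exact ⟨h1, h2, by omega⟩
  · rintro ⟨h1, h2, h3⟩; exact ⟨h1, h2, (x - 3) / 2, by omega⟩

lemma pairwise_pyRange32 (b : Int) :
    (PySem.List.pyRange 3 b 2).Pairwise (· < ·) := by
  rw [PySem.List.pyRange_of_pos 3 b (by norm_num)]
  exact (List.pairwise_lt_range).map _ (by intro a c h; omega)

lemma mem_take01 (n : Nat) (hn : 2 ≤ n) (x : Int) :
    x ∈ List.take n ([0, 1] : List Int) ↔ x = 0 ∨ x = 1 := by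
  rw [List.take_of_length_le (by simpa using hn)]
  simp

theorem assign_relevant_positions_py_eq (total_lines : Int) :
    assign_relevant_positions_py total_lines = assign_relevant_positions_py_alt total_lines := by
  unfold assign_relevant_positions_py assign_relevant_positions_py_alt
  by_cases h : total_lines ≤ 0
  · simp [h]
  · simp only [h, if_false]
    have hfold :
        (PySem.List.pyRange 0 total_lines 1).foldl
          (fun relevant pos =>
            let line_number := pos + 1
            if (line_number == 1 || line_number == 2)
                || (decide (3 ≤ line_number) && PySem.Int.mod line_number 2 == 0)
            then relevant ++ [pos] else relevant) []
          = (PySem.List.pyRange 0 total_lines 1).filter pvRelP := by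
      simpa [pvRelP] using
        PySem.List.foldl_append_if_eq_filter pvRelP (PySem.List.pyRange 0 total_lines 1) []
    rw [hfold, PySem.List.slice_to _ (by omega)]
    -- both sides are strictly increasing lists with the same membership
    have hsortL : ((PySem.List.pyRange 0 total_lines 1).filter pvRelP).Pairwise (· < ·) :=
      (PySem.List.pairwise_lt_pyRange_one 0 total_lines).filter pvRelP
    have hmem3 : ∀ x ∈ PySem.List.pyRange 3 total_lines 2, (1 : Int) < x := by
      intro x hx; have := (mem_pyRange32 _ x).mp hx; omega
    have hsortR : (List.take total_lines.toNat ([0, 1] : List Int)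
        ++ PySem.List.pyRange 3 total_lines 2).Pairwise (· < ·) := by
      rw [List.pairwise_append]
      refine ⟨(by decide : ([0,1] : List Int).Pairwise (· < ·)).sublist (List.take_sublist _ _),
        pairwise_pyRange32 _, ?_⟩
      intro a ha b hb
      have hbx := hmem3 b hb
      have : a ∈ ([0, 1] : List Int) := List.mem_of_mem_take ha
      simp at this; omega
    apply List.Perm.eq_of_pairwise (by intro a b _ _ h1 h2; omega) hsortL hsortR
    rw [List.perm_ext_iff_of_nodup hsortL.nodup hsortR.nodup]
    intro x
    simp only [List.mem_filter, PySem.List.mem_pyRange_one, List.mem_append, mem_pyRange32,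
      pvRelP_iff]
    by_cases h2 : 2 ≤ total_lines.toNat
    · rw [mem_take01 _ h2]
      omega
    · -- total_lines = 1 : take 1 [0,1] = [0]
      have h1 : total_lines.toNat = 1 := by omega
      rw [h1]
      simp
      omega

-- ===== VERDICT (by name: the statement is the Claim_ definition above) =====
theorem assign_relevant_positions_py_spec : Claim_equal_assign_relevant_positions_py := by
  intro t _
  exact assign_relevant_positions_py_eq t
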